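-- pv_equiv track=rewrite | github.com/Tofu-Gang/impractical_projects | 04_us_civil_war_ciphers/rail_fence_cipher.py | make_ciphertext
-- ===== SOURCE A (Python) =====
-- from typing import Union
--
-- def make_ciphertext(plaintext: str,
--                     word_length: int,
--                     rails: int = 2) -> Union[str, None]:
--     """
--     Applies the rail fence cipher to the plaintext.
--
--     :param plaintext: original text
--     :param word_length: length of words the final cipher will be split to
--     :return: cipher text
--     """
--
--     # remove whitespace and capitalize everything
--     prepared = plaintext.replace(" ", "").upper()
--     if rails > 1:
--         # stack and stagger letters in a zigzag pattern
--         rail_fence = "".join(["".join([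
--             prepared[i]
--             for i in range(len(prepared))
--             if i % rails == mod])
--             for mod in range(rails)])
--         # split the result into words of desired length
--         words_count = len(rail_fence) // word_length
--         ciphertext = " ".join(
--             [rail_fence[i * word_length: (i + 1) * word_length]
--              for i in range(words_count)])
--         # if there is not enough characters to form the last word, don't forget
--         # to append the rest as a shorter word
--         ciphertext += " " + rail_fence[words_count * word_length:]
--         return ciphertext.strip()
--     else:
--         return None
-- ===== SOURCE B (Python) =====
-- def make_ciphertext(plaintext, word_length, rails=2):
--     """Rail fence cipher: single pass bucketing characters by index mod rails
--     (instead of one full scan of the text per rail), then direct chunking into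
--     words with a stepped range; the final strip() is kept as in the original."""
--     if rails <= 1:
--         return None
--     prepared = plaintext.replace(" ", "").upper()
--     buckets = [[] for _ in range(rails)]
--     for i, ch in enumerate(prepared):
--         buckets[i % rails].append(ch)
--     rail_fence = "".join("".join(b) for b in buckets)
--     words = [rail_fence[i:i + word_length] for i in range(0, len(rail_fence), word_length)]
--     return " ".join(words).strip()
-- ===== Notes on version B (the rewrite author's own statement) =====
-- stated objective: faster
-- what changed: B buckets each character once by index mod rails (one pass) instead of scanning the whole text once per rail, and splits into words with a single stepped range instead of computing a word count plus a separate remainder append.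
import Mathlib
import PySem

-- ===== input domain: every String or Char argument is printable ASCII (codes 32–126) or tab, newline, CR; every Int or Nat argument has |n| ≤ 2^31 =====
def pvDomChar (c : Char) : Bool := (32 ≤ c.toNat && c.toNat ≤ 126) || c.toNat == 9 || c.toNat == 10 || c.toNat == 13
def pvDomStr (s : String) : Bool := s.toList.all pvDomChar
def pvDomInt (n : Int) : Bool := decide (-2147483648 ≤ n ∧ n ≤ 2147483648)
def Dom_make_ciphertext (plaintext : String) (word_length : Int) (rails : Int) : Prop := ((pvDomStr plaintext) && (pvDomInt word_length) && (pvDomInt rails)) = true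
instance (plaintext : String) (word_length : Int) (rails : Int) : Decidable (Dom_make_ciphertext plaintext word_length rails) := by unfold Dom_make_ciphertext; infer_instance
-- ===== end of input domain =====

-- B replaces A's one-scan-of-the-text-per-rail comprehension by a single pass bucketing each
-- character once by index mod rails, and A's word-count/remainder split by one stepped range
-- (objective: faster); B keeps A's final strip().

-- ===== PORT A =====
def make_ciphertext (plaintext : String) (word_length : Int) (rails : Int) : Option String :=
  -- prepared = plaintext.replace(" ", "").upper()
  let prepared : List Char := PySem.Chars.upper (PySem.Chars.replace plaintext.toList [' '] [])
  if 1 < rails then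
    -- "".join("".join(prepared[i] for i in range(len(prepared)) if i % rails == mod) for mod in range(rails))
    let rail_fence : List Char :=
      (PySem.List.pyRange 0 rails 1).flatMap (fun m =>
        (PySem.List.pyRange 0 (prepared.length : Int) 1).filterMap (fun i =>
          if PySem.Int.mod i rails = m then PySem.List.pyGet? prepared i else none))
    -- words_count = len(rail_fence) // word_length; ZeroDivisionError (none) iff word_length = 0
    (PySem.Int.floordiv? (rail_fence.length : Int) word_length).map (fun words_count =>
      let ciphertext : List Char :=
        PySem.Chars.join [' ']
          ((PySem.List.pyRange 0 words_count 1).map (fun i =>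
            PySem.List.slice rail_fence (some (i * word_length)) (some ((i + 1) * word_length))))
        ++ [' '] ++ PySem.List.slice rail_fence (some (words_count * word_length)) none
      String.ofList (PySem.Chars.strip ciphertext))
  else
    none

-- ===== PORT B =====
def make_ciphertext_alt (plaintext : String) (word_length : Int) (rails : Int) : Option String :=
  if rails ≤ 1 then none
  else
    let prepared : List Char := PySem.Chars.upper (PySem.Chars.replace plaintext.toList [' '] [])
    -- buckets[i % rails].append(ch): 0 ≤ i % rails < rails = len(buckets), so Python's list
    -- indexing/append is exactly List.modify at index (i % rails).toNat
    let buckets : List (List Char) :=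
      (PySem.List.enumerate prepared 0).foldl
        (fun bs p => bs.modify (PySem.Int.mod p.1 rails).toNat (fun b => b ++ [p.2]))
        (List.replicate rails.toNat [])
    let rail_fence : List Char := buckets.flatten
    if word_length = 0 then none   -- range(0, n, 0) raises ValueError (outside Pre_)
    else
      some (String.ofList (PySem.Chars.strip (PySem.Chars.join [' ']
        ((PySem.List.pyRange 0 (rail_fence.length : Int) word_length).map (fun i =>
          PySem.List.slice rail_fence (some i) (some (i + word_length)))))))

-- ===== PRECONDITION & SPEC =====
-- Pre_ excludes only word_length = 0 with rails > 1, where both programs raise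
-- (A: ZeroDivisionError in len(rail_fence) // 0; B: ValueError in range(0, n, 0)).
def Pre_make_ciphertext (plaintext : String) (word_length : Int) (rails : Int) : Prop :=
  1 < rails → word_length ≠ 0
instance (plaintext : String) (word_length : Int) (rails : Int) : Decidable (Pre_make_ciphertext plaintext word_length rails) := by unfold Pre_make_ciphertext; infer_instance

def pvWitness_make_ciphertext : String × Int × Int := ("HELLO WORLD", 3, 3)

def Spec_make_ciphertext (plaintext : String) (word_length : Int) (rails : Int) (out : Option String) : Prop := out = make_ciphertext_alt plaintext word_length rails
instance (plaintext : String) (word_length : Int) (rails : Int) (out : Option String) : Decidable (Spec_make_ciphertext plaintext word_length rails out) := by unfold Spec_make_ciphertext; infer_instance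

-- ===== CLAIM (what is proved, stated in full; the proofs are below) =====
def Claim_equal_make_ciphertext : Prop := ∀ (plaintext : String) (word_length : Int) (rails : Int), Dom_make_ciphertext plaintext word_length rails → Pre_make_ciphertext plaintext word_length rails → Spec_make_ciphertext plaintext word_length rails (make_ciphertext plaintext word_length rails)

-- ===== LEMMAS AND PROOFS =====

theorem pv_isspace_space : PySem.Chars.isspace ' ' = true := by decide

-- rstrip eats a trailing space
theorem pv_rstrip_append_space (s : List Char) :
    PySem.Chars.rstrip (s ++ [' ']) = PySem.Chars.rstrip s := by
  simp [PySem.Chars.rstrip, pv_isspace_space]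

-- strip eats a trailing space
theorem pv_strip_append_space (s : List Char) :
    PySem.Chars.strip (s ++ [' ']) = PySem.Chars.strip s := by
  simp only [PySem.Chars.strip, PySem.Chars.lstrip, List.dropWhile_append]
  by_cases h : (List.dropWhile PySem.Chars.isspace s).isEmpty
  · have h' : List.dropWhile PySem.Chars.isspace s = [] := List.isEmpty_iff.mp h
    simp [h', PySem.Chars.rstrip, List.dropWhile, pv_isspace_space]
  · simp [h, pv_rstrip_append_space]

-- strip eats a leading space
theorem pv_strip_cons_space (s : List Char) :
    PySem.Chars.strip (' ' :: s) = PySem.Chars.strip s := by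
  simp [PySem.Chars.strip, PySem.Chars.lstrip, List.dropWhile, pv_isspace_space]

-- a negative-step range that goes upward is empty
theorem pv_pyRange_neg_eq_nil (a b s : Int) (hs : s < 0) (hab : a ≤ b) :
    PySem.List.pyRange a b s = [] := by
  simp only [PySem.List.pyRange]
  rw [if_neg (by omega), if_neg (by omega), if_neg (by omega)]
  simp

-- " ".join(ws + [t]) appends " " + t when ws is nonempty
theorem pv_join_append_singleton (sep t : List Char) (ws : List (List Char)) (h : ws ≠ []) :
    PySem.Chars.join sep (ws ++ [t]) = PySem.Chars.join sep ws ++ sep ++ t := by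
  induction ws with
  | nil => simp at h
  | cons a tl ih =>
    cases tl with
    | nil => simp [PySem.Chars.join_cons_cons, PySem.Chars.join_singleton]
    | cons b tl' =>
      rw [List.cons_append, List.cons_append, PySem.Chars.join_cons_cons,
        PySem.Chars.join_cons_cons, ← List.cons_append, ih (by simp)]
      simp

-- a comprehension with a filter: filterMap of (if P then some ∘ g) is map g after filter
theorem pv_filterMap_if {α β : Type} (l : List α) (P : α → Prop) [DecidablePred P] (g : α → β) :
    l.filterMap (fun x => if P x then some (g x) else none)
      = (l.filter (fun x => decide (P x))).map g := by
  induction l with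
  | nil => rfl
  | cons a t ih => by_cases h : P a <;> simp [h, ih]

-- B's bucketing fold, observed bucket by bucket
theorem pv_fold_get? (r : Int) (cs : List Char) :
    ∀ (s : Int) (bs : List (List Char)) (j : Nat),
    ((PySem.List.enumerate cs s).foldl
        (fun bs p => bs.modify (PySem.Int.mod p.1 r).toNat (fun b => b ++ [p.2])) bs)[j]?
      = bs[j]?.map (· ++ ((PySem.List.enumerate cs s).filter
          (fun p => (PySem.Int.mod p.1 r).toNat = j)).map (·.2)) := by
  induction cs with
  | nil => intro s bs j; simp [PySem.List.enumerate_nil, Option.map_id']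
  | cons c tl ih =>
    intro s bs j
    rw [PySem.List.enumerate_cons, List.foldl_cons, ih]
    rw [List.getElem?_modify]
    by_cases hj : (PySem.Int.mod s r).toNat = j
    · cases h : bs[j]? <;> simp [hj]
    · cases h : bs[j]? <;> simp [hj]

-- one rail of A's comprehension is the mod-class bucket of the enumeration
theorem pv_bucket_eq (cs : List Char) (r : Int) (hr : 1 < r) (j : Nat) :
    (PySem.List.pyRange 0 (cs.length : Int) 1).filterMap (fun i =>
        if PySem.Int.mod i r = ((j : Nat) : Int) then PySem.List.pyGet? cs i else none)
      = ((PySem.List.enumerate cs 0).filter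
          (fun p => (PySem.Int.mod p.1 r).toNat = j)).map (·.2) := by
  rw [List.filterMap_congr (g := fun i =>
        if PySem.Int.mod i r = ((j : Nat) : Int) then some (PySem.List.pyGetD cs i ' ') else none)]
  · rw [pv_filterMap_if]
    rw [PySem.List.enumerate_eq_map_pyRange cs ' ', List.filter_map, List.map_map]
    simp only [PySem.List.len_eq]
    apply congrArg
    apply List.filter_congr
    intro i _
    have hnn : 0 ≤ PySem.Int.mod i r := PySem.Int.mod_nonneg i (by omega)
    simp only [Function.comp]
    congr 1
    simp only [eq_iff_iff]
    omega
  · intro i hi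
    have h := PySem.List.mem_pyRange_one.mp hi
    have h1 : i.toNat < cs.length := by omega
    rw [PySem.List.pyGet?_of_nonneg cs h.1, PySem.List.pyGetD_eq_getElem cs ' ' h.1 h.2,
      List.getElem?_eq_getElem h1]

-- the two rail fences agree
theorem pv_railfence_eq (cs : List Char) (r : Int) (hr : 1 < r) :
    (PySem.List.pyRange 0 r 1).flatMap (fun m =>
        (PySem.List.pyRange 0 (cs.length : Int) 1).filterMap (fun i =>
          if PySem.Int.mod i r = m then PySem.List.pyGet? cs i else none))
      = ((PySem.List.enumerate cs 0).foldl
          (fun bs p => bs.modify (PySem.Int.mod p.1 r).toNat (fun b => b ++ [p.2]))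
          (List.replicate r.toNat [])).flatten := by
  have hbuckets : ((PySem.List.enumerate cs 0).foldl
          (fun bs p => bs.modify (PySem.Int.mod p.1 r).toNat (fun b => b ++ [p.2]))
          (List.replicate r.toNat []))
      = (List.range r.toNat).map (fun j =>
          ((PySem.List.enumerate cs 0).filter
            (fun p => (PySem.Int.mod p.1 r).toNat = j)).map (·.2)) := by
    apply List.ext_getElem?
    intro j
    rw [pv_fold_get? r cs 0 _ j]
    by_cases hj : j < r.toNat <;> simp [hj]
  rw [hbuckets, ← List.flatMap_def, PySem.List.pyRange_one 0 r]
  simp only [zero_add, sub_zero]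
  rw [List.flatMap_map]
  simp only [pv_bucket_eq cs r hr]

-- // on a nonzero divisor
theorem pv_floordiv?_eq (a b : Int) (h : b ≠ 0) :
    PySem.Int.floordiv? a b = some (PySem.Int.floordiv a b) := by
  simp [PySem.Int.floordiv?, PySem.Int.floordiv, h]

-- the two word splittings agree after strip
theorem pv_chunks_eq (rf : List Char) (wl : Int) (hwl : wl ≠ 0) :
    PySem.Chars.strip
      (PySem.Chars.join [' ']
        ((PySem.List.pyRange 0 (PySem.Int.floordiv (rf.length : Int) wl) 1).map (fun i =>
          PySem.List.slice rf (some (i * wl)) (some ((i + 1) * wl))))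
       ++ [' '] ++ PySem.List.slice rf (some (PySem.Int.floordiv (rf.length : Int) wl * wl)) none)
    = PySem.Chars.strip (PySem.Chars.join [' ']
        ((PySem.List.pyRange 0 (rf.length : Int) wl).map (fun i =>
          PySem.List.slice rf (some i) (some (i + wl))))) := by
  rcases lt_or_gt_of_ne hwl with hneg | hpos
  · -- negative word_length: both sides are the empty string
    have hmod := PySem.Int.mod_neg_bounds (rf.length : Int) hneg
    have hdm := PySem.Int.floordiv_mul_add_mod (rf.length : Int) wl
    have hge : (rf.length : Int) ≤ PySem.Int.floordiv (rf.length : Int) wl * wl := by omega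
    have hwc : PySem.Int.floordiv (rf.length : Int) wl ≤ 0 := by nlinarith
    have hsl : PySem.List.slice rf (some (PySem.Int.floordiv (rf.length : Int) wl * wl)) none = [] := by
      rw [PySem.List.slice_from rf (by omega)]
      exact List.drop_eq_nil_of_le (by omega)
    rw [PySem.List.pyRange_one_eq_nil hwc,
      pv_pyRange_neg_eq_nil 0 (rf.length : Int) wl hneg (by positivity), hsl]
    simp only [List.map_nil, PySem.Chars.join_nil, List.nil_append, List.append_nil]
    decide
  · -- positive word_length
    obtain ⟨w, rfl⟩ : ∃ w : Nat, wl = (w : Int) := ⟨wl.toNat, (Int.toNat_of_nonneg (by omega)).symm⟩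
    have hw : 0 < w := by exact_mod_cast hpos
    set n := rf.length with hn
    rw [PySem.Int.floordiv_natCast n w]
    -- A's word list
    have hA : ((PySem.List.pyRange 0 ((n / w : Nat) : Int) 1).map (fun i =>
          PySem.List.slice rf (some (i * (w:Int))) (some ((i + 1) * (w:Int)))))
        = (List.range (n / w)).map (fun k => List.take w (List.drop (k * w) rf)) := by
      rw [PySem.List.pyRange_one, List.map_map]
      simp only [sub_zero, Int.toNat_natCast]
      apply List.map_congr_left
      intro k _
      have e1 : ((0:Int) + (k:Int)) * (w:Int) = ((k * w : Nat) : Int) := by push_cast; ring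
      have e2 : ((0:Int) + (k:Int) + 1) * (w:Int) = (((k * w + w) : Nat) : Int) := by push_cast; ring
      simp only [Function.comp, e1, e2, PySem.List.slice_natCast, Nat.add_sub_cancel_left]
    -- B's word list
    have hB : ((PySem.List.pyRange 0 (n : Int) (w : Int)).map (fun i =>
          PySem.List.slice rf (some i) (some (i + (w:Int)))))
        = (List.range (if 0 < n then (n + w - 1) / w else 0)).map
            (fun k => List.take w (List.drop (k * w) rf)) := by
      rw [PySem.List.pyRange_of_pos 0 (n : Int) (by exact_mod_cast hw), List.map_map]
      have hcount : (if (0:Int) < (n:Int) then (((n:Int) - 0 + (w:Int) - 1) / (w:Int)).toNat else 0)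
          = (if 0 < n then (n + w - 1) / w else 0) := by
        by_cases h0 : 0 < n
        · rw [if_pos (by exact_mod_cast h0), if_pos h0]
          have e : ((n:Int) - 0 + (w:Int) - 1) = ((n + w - 1 : Nat) : Int) := by omega
          rw [e, ← Int.natCast_div, Int.toNat_natCast]
        · rw [if_neg (by exact_mod_cast h0), if_neg h0]
      rw [hcount]
      apply List.map_congr_left
      intro k _
      have e1 : ((0:Int) + (w:Int) * (k:Int)) = ((k * w : Nat) : Int) := by push_cast; ring
      have e2 : (((k * w : Nat)) : Int) + (w:Int) = (((k * w + w) : Nat) : Int) := by push_cast; ring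
      simp only [Function.comp, e1, e2, PySem.List.slice_natCast, Nat.add_sub_cancel_left]
    rw [hA, hB]
    -- the tail word
    have etail : (((n / w : Nat) : Int) * (w : Int)) = (((n / w * w) : Nat) : Int) := by push_cast; ring
    rw [etail, PySem.List.slice_from_natCast]
    have key : ∀ m : Nat, 0 < m → (m - 1) / w + (if w ∣ m then 1 else 0) = m / w := by
      intro m hm
      conv_rhs => rw [show m = (m - 1) + 1 from by omega]
      rw [Nat.succ_div, show (m - 1) + 1 = m from by omega]
    by_cases hdvd : w ∣ n
    · -- exact fit: same words; A's appended space is removed by strip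
      have hc : (if 0 < n then (n + w - 1) / w else 0) = n / w := by
        by_cases h0 : 0 < n
        · rw [if_pos h0, show n + w - 1 = (n - 1) + w from by omega, Nat.add_div_right _ hw]
          have hk := key n h0; rw [if_pos hdvd] at hk; omega
        · rw [if_neg h0, show n = 0 from by omega]
          simp
      rw [hc, Nat.div_mul_cancel hdvd,
        show List.drop n rf = [] from by rw [hn]; exact List.drop_length,
        List.append_nil, pv_strip_append_space]
    · -- a shorter last word: B's extra chunk is exactly A's appended remainder
      have h0 : 0 < n := by
        rcases Nat.eq_zero_or_pos n with h | h
        · exact absurd (h ▸ dvd_zero w) hdvd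
        · exact h
      have hc : (if 0 < n then (n + w - 1) / w else 0) = n / w + 1 := by
        rw [if_pos h0, show n + w - 1 = (n - 1) + w from by omega, Nat.add_div_right _ hw]
        have hk := key n h0; rw [if_neg hdvd] at hk; omega
      rw [hc, List.range_succ, List.map_append, List.map_singleton]
      have hmod : n / w * w + n % w = n := Nat.div_add_mod' n w
      have hlt : n % w < w := Nat.mod_lt _ hw
      have htail : List.take w (List.drop (n / w * w) rf) = List.drop (n / w * w) rf := by
        apply List.take_of_length_le
        rw [List.length_drop, ← hn]
        omega
      rw [htail]
      by_cases hq : n / w = 0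
      · rw [hq]
        simp only [List.range_zero, List.map_nil, PySem.Chars.join_nil, List.nil_append,
          List.singleton_append, PySem.Chars.join_singleton]
        rw [pv_strip_cons_space]
      · rw [pv_join_append_singleton _ _ _ (by simp [hq])]

-- ===== VERDICT (by name: the statement is the Claim_ definition above) =====
theorem make_ciphertext_spec : Claim_equal_make_ciphertext := by
  intro plaintext wl r _hdom hpre
  unfold Spec_make_ciphertext make_ciphertext make_ciphertext_alt
  by_cases hr : 1 < r
  · have hwl : wl ≠ 0 := hpre hr
    have hr' : ¬ r ≤ 1 := by omega
    simp only [if_pos hr, if_neg hr', if_neg hwl]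
    rw [pv_railfence_eq _ r hr]
    rw [pv_floordiv?_eq _ wl hwl, Option.map_some]
    rw [pv_chunks_eq _ wl hwl]
  · have hr' : r ≤ 1 := by omega
    simp [if_neg hr, if_pos hr']
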